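-- pv_equiv track=rewrite | github.com/piyush-kgp/DSAlgoPractice | codechef/codechef_practice-master/ZCO12001_sol2.py | max_nest_length
-- ===== SOURCE A (Python) =====
-- def brace_tracker(arr):
--     i=0
--     braces = 0
--     tracker=[]
--     while i<len(arr):
--         if arr[i]==1:
--             braces+=1
--         elif arr[i]==2:
--             braces-=1
--         tracker.append(braces)
--         i+=1
--     return tracker
--
-- def max_nest_length(arr):
--     tracker = brace_tracker(arr)
--     terminals=[0]
--     for i in range(len(tracker)):
--         if tracker[i]==0: terminals.append(i+1)
--     lengths = [terminals[i+1]-terminals[i] for i in range(len(terminals)-1)]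
--     x=max(lengths)
--     y=lengths.index(x)
--     z=terminals[y]+1
--     return x, z
-- ===== SOURCE B (Python) =====
-- def max_nest_length(arr):
--     balance = 0
--     last_terminal = 0
--     best_len = None
--     best_start = 0
--     for i, v in enumerate(arr):
--         if v == 1:
--             balance += 1
--         elif v == 2:
--             balance -= 1
--         if balance == 0:
--             seg = (i + 1) - last_terminal
--             if best_len is None or seg > best_len:
--                 best_len = seg
--                 best_start = last_terminal + 1
--             last_terminal = i + 1
--     if best_len is None:
--         raise ValueError("max() arg is an empty sequence")
--     return best_len, best_start
-- ===== Notes on version B (the rewrite author's own statement) =====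
-- stated objective: simpler
-- what changed: A builds a prefix-sum tracker list, a terminals list, a difference list, then calls max() and list.index(); B is a single pass over arr keeping a running balance and the best (length, start) pair, with strict > preserving A's first-maximum tie-break.
import Mathlib
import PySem

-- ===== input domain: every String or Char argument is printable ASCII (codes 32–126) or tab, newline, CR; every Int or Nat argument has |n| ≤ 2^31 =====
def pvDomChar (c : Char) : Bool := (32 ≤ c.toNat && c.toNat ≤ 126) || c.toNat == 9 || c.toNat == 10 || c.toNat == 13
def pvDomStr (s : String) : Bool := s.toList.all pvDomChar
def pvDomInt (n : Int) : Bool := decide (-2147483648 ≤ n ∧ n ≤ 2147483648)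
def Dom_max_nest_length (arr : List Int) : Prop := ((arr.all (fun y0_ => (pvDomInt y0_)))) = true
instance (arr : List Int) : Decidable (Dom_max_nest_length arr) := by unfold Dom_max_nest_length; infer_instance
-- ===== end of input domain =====

-- B replaces A's four passes (prefix-sum list, terminal list, difference list, max+index)
-- by one pass keeping a running balance and the best (length, start) so far: simpler, same O(n) cost.
-- A and B both raise ValueError when no prefix of arr balances (max of an empty list); Pre_ excludes exactly those inputs.

-- ===== PORT A =====
def btGo : List Int → Int → List Int
  | [], _ => []
  | a :: rest, braces =>
    let b := if a = 1 then braces + 1 else if a = 2 then braces - 1 else braces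
    b :: btGo rest b

def brace_tracker (arr : List Int) : List Int := btGo arr 0

def max_nest_length (arr : List Int) : Int × Int :=
  let tracker := brace_tracker arr
  let terminals : List Int :=
    (PySem.List.enumerate tracker 0).foldl
      (fun ts p => if p.2 = 0 then ts ++ [p.1 + 1] else ts) [(0 : Int)]
  let lengths : List Int :=
    (List.range (terminals.length - 1)).map
      (fun i => terminals.getD (i + 1) 0 - terminals.getD i 0)
  match PySem.List.max? lengths (fun y => y) with
  | none => (0, 0)   -- Python: max([]) raises ValueError; excluded by Pre_
  | some x =>
    match PySem.List.index? lengths x with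
    | none => (0, 0) -- unreachable: x ∈ lengths
    | some y => (x, terminals.getD y 0 + 1)

-- ===== PORT B =====
def altGo : List Int → Int → Int → Int → Option (Int × Int) → Option (Int × Int)
  | [], _, _, _, best => best
  | v :: rest, i, balance, last_terminal, best =>
    let b := if v = 1 then balance + 1 else if v = 2 then balance - 1 else balance
    if b = 0 then
      let seg := (i + 1) - last_terminal
      let best' := match best with
        | none => some (seg, last_terminal + 1)
        | some (bl, bs) => if seg > bl then some (seg, last_terminal + 1) else some (bl, bs)
      altGo rest (i + 1) b (i + 1) best'
    else
      altGo rest (i + 1) b last_terminal best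

def max_nest_length_alt (arr : List Int) : Int × Int :=
  match altGo arr 0 0 0 none with
  | some p => p
  | none => (0, 0)   -- Python: raise ValueError; excluded by Pre_

-- ===== PRECONDITION & SPEC =====
-- Pre_ holds exactly when some nonempty prefix of arr has as many 1s as 2s;
-- otherwise Python A raises ValueError (max of an empty list) and Python B raises ValueError too.
def Pre_max_nest_length (arr : List Int) : Prop :=
  ∃ n < arr.length, (arr.take (n + 1)).count 1 = (arr.take (n + 1)).count 2
instance (arr : List Int) : Decidable (Pre_max_nest_length arr) := by
  unfold Pre_max_nest_length; infer_instance

def pvWitness_max_nest_length : List Int := [1, 2]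

def Spec_max_nest_length (arr : List Int) (out : Int × Int) : Prop := out = max_nest_length_alt arr
instance (arr : List Int) (out : Int × Int) : Decidable (Spec_max_nest_length arr out) := by
  unfold Spec_max_nest_length; infer_instance

-- ===== CLAIM (what is proved, stated in full; the proofs are below) =====
def Claim_equal_max_nest_length : Prop := ∀ (arr : List Int), Dom_max_nest_length arr → Pre_max_nest_length arr → Spec_max_nest_length arr (max_nest_length arr)

-- ===== LEMMAS AND PROOFS =====

-- start positions of segments: for tracker elements (first one at index i), the value j+1 for each j with tracker[j] = 0
def zstarts : List Int → Int → List Int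
  | [], _ => []
  | t :: rest, i => if t = 0 then (i + 1) :: zstarts rest (i + 1) else zstarts rest (i + 1)

-- adjacent differences of (p :: ts)
def diffs : Int → List Int → List Int
  | _, [] => []
  | p, t :: rest => (t - p) :: diffs t rest

-- canonical "first maximal segment" over terminal values ts, previous terminal last
def fm : Int → List Int → Option (Int × Int)
  | _, [] => none
  | last, t :: rest =>
    match fm t rest with
    | none => some (t - last, last + 1)
    | some (ml, ms) => if ml > t - last then some (ml, ms) else some (t - last, last + 1)

def updBest (best : Option (Int × Int)) (seg start : Int) : Option (Int × Int) :=
  match best with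
  | none => some (seg, start)
  | some (bl, bs) => if seg > bl then some (seg, start) else some (bl, bs)

def foldStep : List Int → Int → Option (Int × Int) → Option (Int × Int)
  | [], _, best => best
  | t :: rest, last, best => foldStep rest t (updBest best (t - last) (last + 1))

def combine (best : Option (Int × Int)) (r : Option (Int × Int)) : Option (Int × Int) :=
  match best, r with
  | none, r => r
  | some b, none => some b
  | some (bl, bs), some (ml, ms) => if ml > bl then some (ml, ms) else some (bl, bs)

theorem terminals_eq (tr : List Int) : ∀ (s : Int) (acc : List Int),
    (PySem.List.enumerate tr s).foldl (fun ts p => if p.2 = 0 then ts ++ [p.1 + 1] else ts) acc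
      = acc ++ zstarts tr s := by
  induction tr with
  | nil => intro s acc; simp [PySem.List.enumerate_nil, zstarts]
  | cons t rest ih =>
    intro s acc
    rw [PySem.List.enumerate_cons]
    simp only [List.foldl_cons, zstarts]
    by_cases h : t = 0 <;> simp [h, ih, List.append_assoc]

theorem lengths_eq (ts : List Int) : ∀ (p : Int),
    (List.range ts.length).map
      (fun i => (p :: ts).getD (i + 1) 0 - (p :: ts).getD i 0) = diffs p ts := by
  induction ts with
  | nil => intro p; simp [diffs]
  | cons t rest ih =>
    intro p
    rw [List.length_cons, List.range_succ_eq_map]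
    simp only [List.map_cons, List.map_map, diffs]
    have htail :
        List.map ((fun i => (p :: t :: rest).getD (i + 1) 0 - (p :: t :: rest).getD i 0) ∘ Nat.succ)
          (List.range rest.length) = diffs t rest := by
      rw [← ih t]
      apply List.map_congr_left
      intro i _
      simp [Function.comp, List.getD]
    rw [htail]
    simp [List.getD]

theorem altGo_eq (l : List Int) : ∀ (i balance last : Int) (best : Option (Int × Int)),
    altGo l i balance last best = foldStep (zstarts (btGo l balance) i) last best := by
  induction l with
  | nil => intro i balance last best; simp [altGo, btGo, zstarts, foldStep]
  | cons v rest ih =>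
    intro i balance last best
    simp only [altGo, btGo, zstarts]
    set b := if v = 1 then balance + 1 else if v = 2 then balance - 1 else balance with hb
    by_cases h : b = 0
    · simp only [h, if_true, ih, foldStep, updBest]
    · simp only [h, if_false, ih]

theorem foldStep_eq_combine (ts : List Int) : ∀ (last : Int) (best : Option (Int × Int)),
    foldStep ts last best = combine best (fm last ts) := by
  induction ts with
  | nil =>
    intro last best
    rcases best with _ | ⟨bl, bs⟩ <;> simp [foldStep, fm, combine]
  | cons t rest ih =>
    intro last best
    simp only [foldStep, fm, ih]
    rcases best with _ | ⟨bl, bs⟩ <;>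
      rcases h : fm t rest with _ | ⟨ml, ms⟩ <;>
        simp only [updBest, combine] <;>
          split_ifs <;> first | rfl | omega | (simp only [combine]; split_ifs <;> first | rfl | omega)

theorem fm_char (ts : List Int) : ∀ (last : Int), ts ≠ [] →
    ∃ x y, PySem.List.max? (diffs last ts) (fun y => y) = some x ∧
      PySem.List.index? (diffs last ts) x = some y ∧
      fm last ts = some (x, (last :: ts).getD y 0 + 1) := by
  induction ts with
  | nil => intro last h; exact absurd rfl h
  | cons t rest ih =>
    intro last _
    rcases rest with _ | ⟨r, rs⟩
    · refine ⟨t - last, 0, ?_, ?_, ?_⟩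
      · rw [diffs, diffs, PySem.List.max?_id_cons]; simp
      · rw [diffs, diffs, PySem.List.index?_cons_self]
      · simp [fm, List.getD]
    · obtain ⟨mx, my, hmax, hidx, hfm⟩ := ih t (by simp)
      have hL : diffs t (r :: rs) = (r - t) :: diffs r rs := rfl
      have hD : diffs last (t :: r :: rs) = (t - last) :: diffs t (r :: rs) := rfl
      have hmx : (diffs r rs).foldl max (r - t) = mx := by
        rw [hL, PySem.List.max?_id_cons] at hmax
        injection hmax
      have hmax' : PySem.List.max? (diffs last (t :: r :: rs)) (fun y => y)
          = some (max (t - last) mx) := by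
        rw [hD, PySem.List.max?_id_cons, hL, List.foldl_cons, List.foldl_assoc, hmx]
      by_cases hgt : mx > t - last
      · refine ⟨mx, my + 1, ?_, ?_, ?_⟩
        · rw [hmax']; congr 1; omega
        · rw [hD, PySem.List.index?_cons_of_ne (x := t - last) (v := mx)
            (diffs t (r :: rs)) (by omega), hidx]
          rfl
        · show (match fm t (r :: rs) with
            | none => some (t - last, last + 1)
            | some (ml, ms) => if ml > t - last then some (ml, ms)
                else some (t - last, last + 1)) = _
          rw [hfm]
          simp [hgt]
      · refine ⟨t - last, 0, ?_, ?_, ?_⟩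
        · rw [hmax']; congr 1; omega
        · rw [hD, PySem.List.index?_cons_self]
        · show (match fm t (r :: rs) with
            | none => some (t - last, last + 1)
            | some (ml, ms) => if ml > t - last then some (ml, ms)
                else some (t - last, last + 1)) = _
          rw [hfm]
          simp [hgt, List.getD]

theorem tracker_getD (arr : List Int) : ∀ (b : Int) (n : Nat), n < arr.length →
    (btGo arr b).getD n 0
      = b + ((arr.take (n + 1)).count 1 : Int) - ((arr.take (n + 1)).count 2 : Int) := by
  induction arr with
  | nil => intro b n h; simp at h
  | cons a rest ih =>
    intro b n hn
    cases n with
    | zero =>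
      simp only [btGo, List.take_succ_cons, List.take_zero, List.getD_cons_zero]
      by_cases h1 : a = 1 <;> by_cases h2 : a = 2 <;>
        simp [h1, h2]
    | succ m =>
      simp only [btGo, List.getD_cons_succ, List.take_succ_cons]
      rw [ih _ m (by simpa using hn)]
      by_cases h1 : a = 1 <;> by_cases h2 : a = 2 <;>
        simp [h1, h2, List.count_cons] <;> omega

theorem length_btGo (arr : List Int) : ∀ b, (btGo arr b).length = arr.length := by
  induction arr with
  | nil => intro b; simp [btGo]
  | cons a rest ih => intro b; simp [btGo, ih]

theorem zstarts_ne_nil (tr : List Int) : ∀ (i : Int) (n : Nat), n < tr.length →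
    tr.getD n 0 = 0 → zstarts tr i ≠ [] := by
  induction tr with
  | nil => intro i n h; simp at h
  | cons t rest ih =>
    intro i n hn h0
    simp only [zstarts]
    by_cases h : t = 0
    · simp [h]
    · rw [if_neg h]
      cases n with
      | zero => simp [List.getD] at h0; exact absurd h0 h
      | succ m =>
        simp only [List.getD_cons_succ] at h0
        exact ih (i + 1) m (by simpa using hn) h0

-- ===== VERDICT (by name: the statement is the Claim_ definition above) =====
theorem max_nest_length_spec : Claim_equal_max_nest_length := by
  intro arr _ hpre
  unfold Spec_max_nest_length
  simp only [max_nest_length, max_nest_length_alt, brace_tracker]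
  obtain ⟨n, hn, hc⟩ := hpre
  have hz : zstarts (btGo arr 0) 0 ≠ [] := by
    apply zstarts_ne_nil (btGo arr 0) 0 n (by rw [length_btGo]; exact hn)
    rw [tracker_getD arr 0 n hn]
    omega
  rw [terminals_eq (btGo arr 0) 0 [(0 : Int)]]
  simp only [List.singleton_append, List.length_cons, Nat.add_sub_cancel]
  rw [lengths_eq (zstarts (btGo arr 0) 0) 0]
  rw [altGo_eq arr 0 0 0 none, foldStep_eq_combine]
  obtain ⟨x, y, hmax, hidx, hfm⟩ := fm_char (zstarts (btGo arr 0) 0) 0 hz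
  rw [hmax]
  rw [PySem.List.index?_eq_idxOf?] at hidx
  simp [hidx, hfm, combine]
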